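-- pv_equiv track=rewrite | github.com/papricie/pyladies | 08_seznamy_a_ntice/Hra/mapa.py | nakresli_mapu
-- ===== SOURCE A (Python) =====
-- def nakresli_mapu(seznam_souradnic, jidlo): # přidán parametr jidlo
--     """
--     Vytvoří mapu 10x10 jako řetězec, kde na poziích
--     uvedených v seznamu_souradnic jsou:
--     'X' je had
--     '.' je prázdné pole
--     '?' je jídlo
--     """
--     mapa = ""
--     for radek in range(20): # vnější cyklus pro řádky
--         for sloupec in range(20): # vnitřní cyklus pro sloupce
--             radek_a_sloupec = (sloupec, radek) # vytvoření dvojice (sloupec, radek)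
--             if radek_a_sloupec in seznam_souradnic: # kontrola, zda je dvojice v seznamu souřadnic
--                 mapa += "X " # přidání 'X' na danou pozici
--             elif radek_a_sloupec in jidlo: # kontrola, zda je dvojice v seznamu jídla
--                 mapa += "? " # přidání '?' na danou pozici
--             else:
--                 mapa += ". " # přidání '.' na danou pozici
--
--         mapa += "\n" # přechod na nový řádek po dokončení jednoho řádku
--
--     return mapa
-- ===== SOURCE B (Python) =====
-- def nakresli_mapu(seznam_souradnic, jidlo):
--     grid = [['.'] * 20 for _ in range(20)]
--     for x, y in jidlo:
--         if 0 <= x < 20 and 0 <= y < 20: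
--             grid[y][x] = '?'
--     for x, y in seznam_souradnic:
--         if 0 <= x < 20 and 0 <= y < 20:
--             grid[y][x] = 'X'
--     return "".join("".join(ch + " " for ch in row) + "\n" for row in grid)
-- ===== Notes on version B (the rewrite author's own statement) =====
-- stated objective: faster
-- what changed: Instead of scanning all 400 cells and testing list membership for each, B paints food then snake coordinates into a 2D char buffer and joins it once.
import Mathlib
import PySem

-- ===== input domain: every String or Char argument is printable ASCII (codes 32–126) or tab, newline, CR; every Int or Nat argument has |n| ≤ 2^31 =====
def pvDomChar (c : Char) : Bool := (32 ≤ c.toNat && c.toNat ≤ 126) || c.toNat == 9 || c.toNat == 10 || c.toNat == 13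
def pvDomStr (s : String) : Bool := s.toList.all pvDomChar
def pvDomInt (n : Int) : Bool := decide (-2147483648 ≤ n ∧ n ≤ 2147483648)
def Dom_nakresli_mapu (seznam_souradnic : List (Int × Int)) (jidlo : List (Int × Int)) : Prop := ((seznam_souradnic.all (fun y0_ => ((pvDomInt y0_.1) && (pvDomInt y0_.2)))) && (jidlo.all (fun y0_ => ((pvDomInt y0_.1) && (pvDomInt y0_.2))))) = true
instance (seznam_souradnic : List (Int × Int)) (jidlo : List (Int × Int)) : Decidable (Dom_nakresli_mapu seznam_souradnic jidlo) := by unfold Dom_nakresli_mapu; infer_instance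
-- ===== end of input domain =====

-- B replaces A's per-cell membership scans by painting the coordinates into a 2D char buffer and joining it once.

-- ===== PORT A =====
def nakresli_mapu (seznam_souradnic : List (Int × Int)) (jidlo : List (Int × Int)) : String :=
  (PySem.List.pyRange 0 20 1).foldl (fun mapa radek =>
    ((PySem.List.pyRange 0 20 1).foldl (fun mapa sloupec =>
      if (sloupec, radek) ∈ seznam_souradnic then mapa ++ "X "
      else if (sloupec, radek) ∈ jidlo then mapa ++ "? "
      else mapa ++ ". ") mapa) ++ "\n") ""

-- ===== PORT B =====
-- one in-bounds write into the grid buffer (mirrors "if 0 <= x < 20 and 0 <= y < 20: grid[y][x] = c")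
def pvWrite (ch : Char) (g : List (List Char)) (p : Int × Int) : List (List Char) :=
  if 0 ≤ p.1 ∧ p.1 < 20 ∧ 0 ≤ p.2 ∧ p.2 < 20 then
    g.set p.2.toNat ((g.getD p.2.toNat []).set p.1.toNat ch)
  else g

def nakresli_mapu_alt (seznam_souradnic : List (Int × Int)) (jidlo : List (Int × Int)) : String :=
  let grid0 := List.replicate 20 (List.replicate 20 '.')
  let grid1 := jidlo.foldl (pvWrite '?') grid0
  let grid2 := seznam_souradnic.foldl (pvWrite 'X') grid1
  String.join (grid2.map (fun row => String.join (row.map (fun ch => String.mk [ch, ' '])) ++ "\n"))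

-- ===== PRECONDITION & SPEC =====
def Spec_nakresli_mapu (seznam_souradnic : List (Int × Int)) (jidlo : List (Int × Int)) (out : String) : Prop := out = nakresli_mapu_alt seznam_souradnic jidlo
instance (seznam_souradnic : List (Int × Int)) (jidlo : List (Int × Int)) (out : String) : Decidable (Spec_nakresli_mapu seznam_souradnic jidlo out) := by unfold Spec_nakresli_mapu; infer_instance

-- ===== CLAIM (what is proved, stated in full; the proofs are below) =====
def Claim_equal_nakresli_mapu : Prop := ∀ (seznam_souradnic : List (Int × Int)) (jidlo : List (Int × Int)), Dom_nakresli_mapu seznam_souradnic jidlo → Spec_nakresli_mapu seznam_souradnic jidlo (nakresli_mapu seznam_souradnic jidlo)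

-- ===== LEMMAS AND PROOFS =====

-- the character each cell carries (column x, row y)
def pvCell (s j : List (Int × Int)) (x y : Int) : Char :=
  if (x, y) ∈ s then 'X' else if (x, y) ∈ j then '?' else '.'

-- grid cell read (column c, row r)
def pvG (g : List (List Char)) (c r : Nat) : Char := (g.getD r []).getD c '!'

def pvShape (g : List (List Char)) : Prop := g.length = 20 ∧ ∀ row ∈ g, row.length = 20

theorem pvStrJoin_cons (a : String) (l : List String) :
    String.join (a :: l) = a ++ String.join l := by
  induction l generalizing a with
  | nil => simp [String.join]
  | cons b t ih =>
      show String.join ((a ++ b) :: t) = _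
      rw [ih, ih b, ← String.append_assoc]

theorem pvFoldlStr (f : Int → String) (l : List Int) (init : String) :
    l.foldl (fun m x => m ++ f x) init = init ++ String.join (l.map f) := by
  induction l generalizing init with
  | nil => simp [String.join]
  | cons a t ih => simp [List.foldl, ih, pvStrJoin_cons, String.append_assoc]

theorem pvGetD_set_nat {α : Type} (l : List α) (i j : Nat) (a d : α) (hj : j < l.length) :
    (l.set i a).getD j d = if i = j then a else l.getD j d := by
  rw [List.getD_eq_getElem?_getD, List.getElem?_set, List.getD_eq_getElem?_getD]
  by_cases h1 : i = j
  · subst h1; simp [hj]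
  · simp [h1]

theorem pvGetD_replicate {α : Type} (n m : Nat) (a d : α) (h : m < n) :
    (List.replicate n a).getD m d = a := by
  rw [List.getD_eq_getElem _ _ (by simpa using h), List.getElem_replicate]

theorem pvWrite_shape (ch : Char) (g : List (List Char)) (p : Int × Int)
    (h : pvShape g) : pvShape (pvWrite ch g p) := by
  unfold pvWrite
  split
  · rename_i hin
    refine ⟨by simpa using h.1, ?_⟩
    intro row hrow
    rcases List.mem_or_eq_of_mem_set hrow with h1 | h1
    · exact h.2 _ h1
    · subst h1
      rw [List.length_set]
      have hy : p.2.toNat < g.length := by rw [h.1]; omega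
      rw [List.getD_eq_getElem _ _ hy]
      exact h.2 _ (List.getElem_mem hy)
  · exact h

theorem pvPaint_shape (ch : Char) (pts : List (Int × Int)) (g : List (List Char))
    (h : pvShape g) : pvShape (pts.foldl (pvWrite ch) g) := by
  induction pts generalizing g with
  | nil => exact h
  | cons p t ih => exact ih _ (pvWrite_shape ch g p h)

theorem pvG_write (ch : Char) (g : List (List Char)) (p : Int × Int)
    (h : pvShape g) (c r : Nat) (hc : c < 20) (hr : r < 20) :
    pvG (pvWrite ch g p) c r = if p = ((c : Int), (r : Int)) then ch else pvG g c r := by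
  obtain ⟨x, y⟩ := p
  unfold pvWrite pvG
  by_cases hin : 0 ≤ x ∧ x < 20 ∧ 0 ≤ y ∧ y < 20
  · rw [if_pos hin]
    have hrlen : r < g.length := by rw [h.1]; exact hr
    have hylen : y.toNat < g.length := by rw [h.1]; omega
    have hrow20 : (g.getD y.toNat []).length = 20 := by
      rw [List.getD_eq_getElem _ _ hylen]; exact h.2 _ (List.getElem_mem hylen)
    rw [pvGetD_set_nat _ _ _ _ _ hrlen]
    by_cases hy : y.toNat = r
    · subst hy
      rw [if_pos rfl, pvGetD_set_nat _ _ _ _ _ (by rw [hrow20]; exact hc)]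
      by_cases hx : x.toNat = c
      · rw [if_pos hx, if_pos (by simp only [Prod.mk.injEq]; omega)]
      · rw [if_neg hx, if_neg (by simp only [Prod.mk.injEq]; omega)]
    · rw [if_neg hy, if_neg (by simp only [Prod.mk.injEq]; omega)]
  · rw [if_neg hin, if_neg (by simp only [Prod.mk.injEq]; omega)]

theorem pvG_paint (ch : Char) (pts : List (Int × Int)) (g : List (List Char))
    (h : pvShape g) (c r : Nat) (hc : c < 20) (hr : r < 20) :
    pvG (pts.foldl (pvWrite ch) g) c r
      = if ((c : Int), (r : Int)) ∈ pts then ch else pvG g c r := by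
  induction pts generalizing g with
  | nil => simp
  | cons p t ih =>
      simp only [List.foldl_cons, ih _ (pvWrite_shape ch g p h),
        pvG_write ch g p h c r hc hr, List.mem_cons]
      by_cases h1 : ((c : Int), (r : Int)) ∈ t
      · simp [h1]
      · by_cases h2 : p = ((c : Int), (r : Int)) <;> simp [h1, h2, eq_comm]

theorem pvGrid_eq (s j : List (Int × Int)) :
    s.foldl (pvWrite 'X') (j.foldl (pvWrite '?') (List.replicate 20 (List.replicate 20 '.')))
      = (List.range 20).map (fun (r : Nat) => (List.range 20).map (fun (c : Nat) => pvCell s j (c : Int) (r : Int))) := by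
  have hsh0 : pvShape (List.replicate 20 (List.replicate 20 '.')) := by
    refine ⟨by simp, ?_⟩
    intro row hrow
    rw [List.eq_of_mem_replicate hrow]; simp
  have hsh1 := pvPaint_shape '?' j _ hsh0
  have hsh2 := pvPaint_shape 'X' s _ hsh1
  apply List.ext_getElem
  · rw [hsh2.1]; simp
  · intro r h1 h2
    have hr : r < 20 := by simpa using h2
    apply List.ext_getElem
    · have hrowlen := hsh2.2 _ (List.getElem_mem h1)
      simpa using hrowlen
    · intro c hc1 hc2
      have hc : c < 20 := by
        have hrowlen := hsh2.2 _ (List.getElem_mem h1)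
        omega
      have e1 : (s.foldl (pvWrite 'X') (j.foldl (pvWrite '?') (List.replicate 20 (List.replicate 20 '.'))))[r][c]
          = pvG (s.foldl (pvWrite 'X') (j.foldl (pvWrite '?') (List.replicate 20 (List.replicate 20 '.')))) c r := by
        rw [pvG, List.getD_eq_getElem _ _ h1, List.getD_eq_getElem]
      rw [e1, pvG_paint 'X' s _ hsh1 c r hc hr, pvG_paint '?' j _ hsh0 c r hc hr]
      have base : pvG (List.replicate 20 (List.replicate 20 '.')) c r = '.' := by
        rw [pvG, pvGetD_replicate _ _ _ _ hr, pvGetD_replicate _ _ _ _ hc]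
      rw [base]
      simp [pvCell]

theorem pvInner (s j : List (Int × Int)) (r : Int) (l : List Int) (init : String) :
    l.foldl (fun m x =>
      if (x, r) ∈ s then m ++ "X " else if (x, r) ∈ j then m ++ "? " else m ++ ". ") init
      = init ++ String.join (l.map (fun c => String.mk [pvCell s j c r, ' '])) := by
  have hbody : (fun (m : String) x =>
      if (x, r) ∈ s then m ++ "X " else if (x, r) ∈ j then m ++ "? " else m ++ ". ")
      = fun m x => m ++ String.mk [pvCell s j x r, ' '] := by
    funext m x
    simp only [pvCell]
    split_ifs <;> rfl
  rw [hbody, pvFoldlStr]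

theorem pvA_eq (s j : List (Int × Int)) :
    nakresli_mapu s j
      = String.join ((List.range 20).map (fun (r : Nat) =>
          String.join ((List.range 20).map (fun (c : Nat) => String.mk [pvCell s j (c : Int) (r : Int), ' '])) ++ "\n")) := by
  rw [nakresli_mapu]
  have houter : (fun (mapa : String) radek =>
      ((PySem.List.pyRange 0 20 1).foldl (fun mapa sloupec =>
        if (sloupec, radek) ∈ s then mapa ++ "X "
        else if (sloupec, radek) ∈ j then mapa ++ "? "
        else mapa ++ ". ") mapa) ++ "\n")
      = fun mapa radek => mapa ++
          (String.join ((PySem.List.pyRange 0 20 1).map (fun c => String.mk [pvCell s j c radek, ' '])) ++ "\n") := by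
    funext mapa radek
    rw [pvInner s j radek, String.append_assoc]
  rw [houter, pvFoldlStr]
  have h20 : PySem.List.pyRange 0 20 1 = (List.range 20).map (fun (k : Nat) => (k : Int)) :=
    PySem.List.pyRange_zero_natCast 20
  simp [h20, List.map_map, Function.comp_def]

-- ===== VERDICT (by name: the statement is the Claim_ definition above) =====
theorem nakresli_mapu_spec : Claim_equal_nakresli_mapu := by
  intro s j _
  show nakresli_mapu s j = nakresli_mapu_alt s j
  rw [pvA_eq, nakresli_mapu_alt]
  rw [pvGrid_eq]
  simp only [List.map_map]
  rfl
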